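-- pv_equiv track=rewrite | github.com/christianebacani/Roadmap | Coding Challenges using Python and SQL/Code Wars Python Solved Problems/7 Kyu/alan_partridge_iii_london.py | alan
-- ===== SOURCE A (Python) =====
-- def alan(arr: list[str]) -> str:
--     stops_alan_mention = {
--         'Rejection': 0,
--         'Disappointment': 0,
--         'Backstabbing Central': 0,
--         'Shattered Dreams Parkway': 0
--     }
--
--     for i in range(len(arr)):
--         if arr[i] not in stops_alan_mention:
--             continue
--
--         stops_alan_mention[arr[i]] = stops_alan_mention[arr[i]] + 1
--
--     for _, frequency in stops_alan_mention.items():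
--         if frequency == 0:
--             return 'No, seriously, run. You will miss it.'
--
--     return 'Smell my cheese you mother!'
-- ===== SOURCE B (Python) =====
-- def alan(arr: list[str]) -> str:
--     missing = ['Rejection', 'Disappointment', 'Backstabbing Central', 'Shattered Dreams Parkway']
--     for stop in arr:
--         if stop in missing:
--             missing.remove(stop)
--             if not missing:
--                 return 'Smell my cheese you mother!'
--     return 'No, seriously, run. You will miss it.'
-- ===== Notes on version B (the rewrite author's own statement) =====
-- stated objective: alternative
-- what changed: Replaces the counting dict and its two loops (increment pass over the whole list, then a frequency-check pass) with a single early-exiting pass that deletes each stop seen from a shrinking list of still-missing stops and returns success the moment that list empties.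
import Mathlib
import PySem

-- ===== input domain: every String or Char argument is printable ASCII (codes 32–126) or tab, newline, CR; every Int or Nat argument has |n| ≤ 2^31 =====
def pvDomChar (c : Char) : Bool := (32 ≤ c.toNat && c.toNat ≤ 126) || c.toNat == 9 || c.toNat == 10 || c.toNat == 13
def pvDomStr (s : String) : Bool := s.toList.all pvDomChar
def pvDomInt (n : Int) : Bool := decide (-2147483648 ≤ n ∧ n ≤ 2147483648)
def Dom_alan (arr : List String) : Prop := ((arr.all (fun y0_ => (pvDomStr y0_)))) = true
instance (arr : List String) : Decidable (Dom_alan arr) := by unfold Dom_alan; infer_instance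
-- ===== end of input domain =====

-- B replaces A's counting dict + two loops by one early-exiting pass over the list that erases each seen stop from a shrinking list of missing stops; alternative decomposition, same cost.


-- ===== PORT A =====
-- the initial dict {'Rejection': 0, …}
def alanInit : PySem.Dict String Int :=
  ((((PySem.Dict.empty).insert "Rejection" 0).insert "Disappointment" 0).insert
      "Backstabbing Central" 0).insert "Shattered Dreams Parkway" 0

-- one iteration of the first loop: 'if arr[i] not in d: continue; d[arr[i]] = d[arr[i]] + 1'
def alanStep (d : PySem.Dict String Int) (x : String) : PySem.Dict String Int :=
  if d.contains x = false then d else d.insert x (d.getD x 0 + 1)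

-- the second loop: 'for _, frequency in d.items(): if frequency == 0: return …'
def alanScan : List (String × Int) → String
  | [] => "Smell my cheese you mother!"
  | (_, f) :: rest =>
    if f = 0 then "No, seriously, run. You will miss it." else alanScan rest

def alan (arr : List String) : String :=
  alanScan
    (((PySem.List.pyRange 0 (PySem.List.len arr) 1).foldl
        (fun d i => alanStep d (PySem.List.pyGetD arr i ""))   -- arr[i]; index always in range
        alanInit).items)

-- ===== PORT B =====
-- the loop of Source B: 'for stop in arr: if stop in missing: missing.remove(stop); if not missing: return …'
def alanAltGo : List String → List String → String
  | _, [] => "No, seriously, run. You will miss it."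
  | missing, x :: rest =>
    if x ∈ missing then
      if missing.erase x = [] then "Smell my cheese you mother!"
      else alanAltGo (missing.erase x) rest
    else alanAltGo missing rest

def alan_alt (arr : List String) : String :=
  alanAltGo ["Rejection", "Disappointment", "Backstabbing Central", "Shattered Dreams Parkway"] arr

-- ===== PRECONDITION & SPEC =====
def Spec_alan (arr : List String) (out : String) : Prop := out = alan_alt arr
instance (arr : List String) (out : String) : Decidable (Spec_alan arr out) := by unfold Spec_alan; infer_instance

-- ===== CLAIM (what is proved, stated in full; the proofs are below) =====
def Claim_equal_alan : Prop := ∀ (arr : List String), Dom_alan arr → Spec_alan arr (alan arr)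

-- ===== LEMMAS AND PROOFS =====

-- a dict of exactly the four stops with given counts
def mkd (a b c e : Int) : PySem.Dict String Int :=
  ((((PySem.Dict.empty).insert "Rejection" a).insert "Disappointment" b).insert
      "Backstabbing Central" c).insert "Shattered Dreams Parkway" e

theorem alan_loop (l : List String) (a b c e : Int) :
    l.foldl alanStep (mkd a b c e)
    = mkd (a + l.count "Rejection") (b + l.count "Disappointment")
        (c + l.count "Backstabbing Central") (e + l.count "Shattered Dreams Parkway") := by
  induction l generalizing a b c e with
  | nil => simp
  | cons x xs ih =>
    simp only [List.foldl_cons, List.count_cons]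
    by_cases h1 : x = "Rejection"
    · subst h1
      rw [show alanStep (mkd a b c e) "Rejection" = mkd (a + 1) b c e from rfl, ih]
      simp; ring_nf
    · by_cases h2 : x = "Disappointment"
      · subst h2
        rw [show alanStep (mkd a b c e) "Disappointment" = mkd a (b + 1) c e from rfl, ih]
        simp; ring_nf
      · by_cases h3 : x = "Backstabbing Central"
        · subst h3
          rw [show alanStep (mkd a b c e) "Backstabbing Central" = mkd a b (c + 1) e from rfl, ih]
          simp; ring_nf
        · by_cases h4 : x = "Shattered Dreams Parkway"
          · subst h4
            rw [show alanStep (mkd a b c e) "Shattered Dreams Parkway" = mkd a b c (e + 1) from rfl, ih]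
            simp; ring_nf
          · have hc : (mkd a b c e).contains x = false := by
              simp [mkd, PySem.Dict.contains_insert, h1, h2, h3, h4]
            rw [show alanStep (mkd a b c e) x = mkd a b c e from by
                  unfold alanStep; rw [if_pos hc], ih]
            simp [h1, h2, h3, h4]

theorem mkd_items (a b c e : Int) :
    (mkd a b c e).items =
      [("Rejection", a), ("Disappointment", b), ("Backstabbing Central", c),
        ("Shattered Dreams Parkway", e)] := rfl

-- characterisation of B's loop: for a nonempty duplicate-free missing list it answers
-- success iff every missing stop occurs in the remaining input
theorem alanAltGo_eq (l missing : List String) (hnd : missing.Nodup) (hne : missing ≠ []) :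
    alanAltGo missing l =
      if ∀ k ∈ missing, k ∈ l then "Smell my cheese you mother!"
      else "No, seriously, run. You will miss it." := by
  induction l generalizing missing with
  | nil =>
    obtain ⟨k, hk⟩ := List.exists_mem_of_ne_nil missing hne
    rw [alanAltGo, if_neg]
    intro hall
    exact (List.not_mem_nil).elim (hall k hk)
  | cons x rest ih =>
    rw [alanAltGo]
    by_cases hx : x ∈ missing
    · rw [if_pos hx]
      by_cases hemp : missing.erase x = []
      · rw [if_pos hemp]
        have hone : missing = [x] := by
          have hlen := List.length_erase_of_mem hx
          rw [hemp] at hlen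
          simp at hlen
          cases missing with
          | nil => simp at hx
          | cons y ys =>
            simp at hlen
            have : ys = [] := List.length_eq_zero_iff.mp hlen.symm
            subst this
            simp at hx
            simp [hx]
        rw [if_pos]
        intro k hk
        rw [hone] at hk
        simp at hk
        simp [hk]
      · rw [if_neg hemp, ih _ (hnd.erase x) hemp]
        have hiff : (∀ k ∈ missing.erase x, k ∈ rest) ↔ (∀ k ∈ missing, k ∈ x :: rest) := by
          constructor
          · intro h k hk
            by_cases hkx : k = x
            · simp [hkx]
            · exact List.mem_cons_of_mem _ (h k ((hnd.mem_erase_iff).mpr ⟨hkx, hk⟩))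
          · intro h k hk
            obtain ⟨hkx, hkm⟩ := (hnd.mem_erase_iff).mp hk
            rcases List.mem_cons.mp (h k hkm) with h' | h'
            · exact absurd h' hkx
            · exact h'
        by_cases hc : ∀ k ∈ missing.erase x, k ∈ rest
        · rw [if_pos hc, if_pos (hiff.mp hc)]
        · rw [if_neg hc, if_neg (fun h => hc (hiff.mpr h))]
    · rw [if_neg hx, ih _ hnd hne]
      have hiff : (∀ k ∈ missing, k ∈ rest) ↔ (∀ k ∈ missing, k ∈ x :: rest) := by
        constructor
        · intro h k hk; exact List.mem_cons_of_mem _ (h k hk)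
        · intro h k hk
          rcases List.mem_cons.mp (h k hk) with h' | h'
          · subst h'; exact absurd hk hx
          · exact h'
      by_cases hc : ∀ k ∈ missing, k ∈ rest
      · rw [if_pos hc, if_pos (hiff.mp hc)]
      · rw [if_neg hc, if_neg (fun h => hc (hiff.mpr h))]

theorem count_ne_zero_iff (x : String) (l : List String) : l.count x ≠ 0 ↔ x ∈ l := by
  simp [List.count_eq_zero]

theorem alan_spec' (arr : List String) : alan arr = alan_alt arr := by
  simp only [alan, alan_alt]
  rw [PySem.List.foldl_pyRange_pyGetD (ha := le_refl 0)]
  simp only [Int.toNat_zero, List.drop_zero]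
  rw [show alanInit = mkd 0 0 0 0 from rfl, alan_loop, mkd_items]
  simp only [zero_add]
  rw [alanAltGo_eq arr _ (by decide) (by decide)]
  by_cases hall : ∀ k ∈ ["Rejection", "Disappointment", "Backstabbing Central",
      "Shattered Dreams Parkway"], k ∈ arr
  · rw [if_pos hall]
    have hR : arr.count "Rejection" ≠ 0 := (count_ne_zero_iff _ _).mpr (hall _ (by simp))
    have hD : arr.count "Disappointment" ≠ 0 := (count_ne_zero_iff _ _).mpr (hall _ (by simp))
    have hB : arr.count "Backstabbing Central" ≠ 0 := (count_ne_zero_iff _ _).mpr (hall _ (by simp))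
    have hS : arr.count "Shattered Dreams Parkway" ≠ 0 := (count_ne_zero_iff _ _).mpr (hall _ (by simp))
    simp [alanScan, hR, hD, hB, hS]
  · rw [if_neg hall]
    push Not at hall
    obtain ⟨k, hk, hknot⟩ := hall
    have hz : arr.count k = 0 := List.count_eq_zero.mpr hknot
    fin_cases hk <;> simp [alanScan, hz]

-- ===== VERDICT (by name: the statement is the Claim_ definition above) =====
theorem alan_spec : Claim_equal_alan := by
  intro arr _
  exact alan_spec' arr
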